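-- pv_equiv track=rewrite | github.com/Rinkim0515/codeKata | 프로그래머스/0/181893. 배열 조각하기/배열 조각하기.py | solution
-- ===== SOURCE A (Python) =====
-- def solution(arr, query):
--     answer = arr
--     for idx,val in enumerate(query):
--         if idx % 2 == 0:
--             answer = answer[:val +1 ]
--         elif idx % 2 != 0:
--             answer = answer[val:]
--     return answer
-- ===== SOURCE B (Python) =====
-- def solution(arr, query):
--     # Track the surviving window [lo, hi) instead of materialising a slice per query.
--     lo, hi = 0, len(arr)
--     for idx, val in enumerate(query):
--         n = hi - lo
--         if idx % 2 == 0: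
--             stop = val + 1
--             if stop < 0:
--                 stop += n
--             hi = lo + max(0, min(stop, n))
--         else:
--             start = val
--             if start < 0:
--                 start += n
--             lo = lo + max(0, min(start, n))
--     return arr[lo:hi]
-- ===== Notes on version B (the rewrite author's own statement) =====
-- stated objective: alternative
-- what changed: Instead of materialising a new list slice for every query, B keeps cumulative window bounds (lo, hi) updated in O(1) per query with Python's slice-clamping arithmetic and slices the array once at the end.
import Mathlib
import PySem

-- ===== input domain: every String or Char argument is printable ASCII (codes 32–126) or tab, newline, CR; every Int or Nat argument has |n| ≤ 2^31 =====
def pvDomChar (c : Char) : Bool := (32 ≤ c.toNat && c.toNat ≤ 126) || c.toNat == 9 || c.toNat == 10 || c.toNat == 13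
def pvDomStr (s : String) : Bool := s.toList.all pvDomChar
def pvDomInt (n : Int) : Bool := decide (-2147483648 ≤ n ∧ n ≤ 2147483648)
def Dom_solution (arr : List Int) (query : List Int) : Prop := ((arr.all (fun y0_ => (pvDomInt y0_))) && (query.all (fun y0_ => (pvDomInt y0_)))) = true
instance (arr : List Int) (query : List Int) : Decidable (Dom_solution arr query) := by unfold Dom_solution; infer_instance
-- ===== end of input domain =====

-- B replaces A's per-query list slicing by arithmetic on a cumulative window [lo,hi)
-- followed by one final slice (alternative algorithm; no speed claim).

-- ===== PORT A =====
-- loop body of A's for-loop over enumerate(query)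
def solStepA (answer : List Int) (p : Int × Int) : List Int :=
  if PySem.Int.mod p.1 2 = 0 then
    PySem.List.slice answer none (some (p.2 + 1))
  else if ¬ (PySem.Int.mod p.1 2 = 0) then
    PySem.List.slice answer (some p.2) none
  else answer

def solution (arr : List Int) (query : List Int) : List Int :=
  (PySem.List.enumerate query 0).foldl solStepA arr

-- ===== PORT B =====
-- loop body of B's for-loop: update the window bounds (lo, hi)
def solStepB (st : Int × Int) (p : Int × Int) : Int × Int :=
  let n := st.2 - st.1
  if PySem.Int.mod p.1 2 = 0 then
    let stop := p.2 + 1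
    let stop := if stop < 0 then stop + n else stop
    (st.1, st.1 + max 0 (min stop n))
  else
    let start := p.2
    let start := if start < 0 then start + n else start
    (st.1 + max 0 (min start n), st.2)

def solution_alt (arr : List Int) (query : List Int) : List Int :=
  let st := (PySem.List.enumerate query 0).foldl solStepB (0, (arr.length : Int))
  PySem.List.slice arr (some st.1) (some st.2)

-- ===== PRECONDITION & SPEC =====
def Spec_solution (arr : List Int) (query : List Int) (out : List Int) : Prop := out = solution_alt arr query
instance (arr : List Int) (query : List Int) (out : List Int) : Decidable (Spec_solution arr query out) := by unfold Spec_solution; infer_instance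

-- ===== CLAIM (what is proved, stated in full; the proofs are below) =====
def Claim_equal_solution : Prop := ∀ (arr : List Int) (query : List Int), Dom_solution arr query → Spec_solution arr query (solution arr query)

-- ===== LEMMAS AND PROOFS =====

theorem clampIdx_as_int (n : Nat) (k : Int) :
    ((PySem.List.clampIdx n k : Nat) : Int)
      = max 0 (min (if k < 0 then k + n else k) n) := by
  unfold PySem.List.clampIdx
  split_ifs <;> omega

theorem slice_none_some (xs : List Int) (b : Int) :
    PySem.List.slice xs none (some b) = xs.take (PySem.List.clampIdx xs.length b) := by
  unfold PySem.List.slice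
  simp [PySem.List.clampIdx]

-- the window of arr denoted by a B-state (lo, hi)
def solWindow (arr : List Int) (lo hi : Int) : List Int :=
  (arr.drop lo.toNat).take (hi - lo).toNat

theorem clampIdx_le' (n : Nat) (k : Int) : PySem.List.clampIdx n k ≤ n := by
  have := clampIdx_as_int n k
  omega

-- main invariant: A's fold over any enumerate tail equals the window of B's fold
theorem sol_loop (arr : List Int) (query : List Int) : ∀ (s lo hi : Int),
    0 ≤ lo → lo ≤ hi → hi ≤ (arr.length : Int) →
    0 ≤ ((PySem.List.enumerate query s).foldl solStepB (lo, hi)).1 ∧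
    ((PySem.List.enumerate query s).foldl solStepB (lo, hi)).1
      ≤ ((PySem.List.enumerate query s).foldl solStepB (lo, hi)).2 ∧
    ((PySem.List.enumerate query s).foldl solStepB (lo, hi)).2 ≤ (arr.length : Int) ∧
    (PySem.List.enumerate query s).foldl solStepA (solWindow arr lo hi)
      = solWindow arr ((PySem.List.enumerate query s).foldl solStepB (lo, hi)).1
                      ((PySem.List.enumerate query s).foldl solStepB (lo, hi)).2 := by
  induction query with
  | nil => intro s lo hi h0 h1 h2; simp [PySem.List.enumerate_nil]; omega
  | cons v rest ih =>
    intro s lo hi h0 h1 h2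
    rw [PySem.List.enumerate_cons]
    simp only [List.foldl_cons]
    set n : Nat := (hi - lo).toNat with hn
    have hlen : (solWindow arr lo hi).length = n := by
      simp [solWindow]
      omega
    by_cases hpar : PySem.Int.mod s 2 = 0
    · -- even index: take a prefix
      have hstepA : solStepA (solWindow arr lo hi) (s, v)
          = (solWindow arr lo hi).take (PySem.List.clampIdx n (v + 1)) := by
        unfold solStepA
        rw [if_pos hpar, slice_none_some, hlen]
      have hclamp : ((PySem.List.clampIdx n (v + 1) : Nat) : Int)
          = max 0 (min (if v + 1 < 0 then v + 1 + (hi - lo) else v + 1) (hi - lo)) := by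
        have h := clampIdx_as_int n (v + 1)
        have hc : ((n : Nat) : Int) = hi - lo := by omega
        rw [hc] at h
        exact h
      have hstepB : solStepB (lo, hi) (s, v)
          = (lo, lo + ((PySem.List.clampIdx n (v + 1) : Nat) : Int)) := by
        unfold solStepB
        rw [if_pos hpar]
        dsimp only
        rw [hclamp]
      set c : Nat := PySem.List.clampIdx n (v + 1) with hc
      have hcle : c ≤ n := clampIdx_le' n (v + 1)
      clear_value n c
      have hwin : (solWindow arr lo hi).take c = solWindow arr lo (lo + (c : Int)) := by
        unfold solWindow
        rw [List.take_take]
        congr 1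
        omega
      rw [hstepA, hwin, hstepB]
      exact ih (s + 1) lo (lo + (c : Int)) h0 (by omega) (by omega)
    · -- odd index: drop a prefix
      have hstepA : solStepA (solWindow arr lo hi) (s, v)
          = (solWindow arr lo hi).drop (PySem.List.clampIdx n v) := by
        unfold solStepA
        rw [if_neg hpar, if_pos hpar, PySem.List.slice_some_none, hlen]
      have hclamp : ((PySem.List.clampIdx n v : Nat) : Int)
          = max 0 (min (if v < 0 then v + (hi - lo) else v) (hi - lo)) := by
        have h := clampIdx_as_int n v
        have hc : ((n : Nat) : Int) = hi - lo := by omega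
        rw [hc] at h
        exact h
      have hstepB : solStepB (lo, hi) (s, v)
          = (lo + ((PySem.List.clampIdx n v : Nat) : Int), hi) := by
        unfold solStepB
        rw [if_neg hpar]
        dsimp only
        rw [hclamp]
      set c : Nat := PySem.List.clampIdx n v with hc
      have hcle : c ≤ n := clampIdx_le' n v
      clear_value n c
      have hwin : (solWindow arr lo hi).drop c = solWindow arr (lo + (c : Int)) hi := by
        unfold solWindow
        rw [List.drop_take, List.drop_drop]
        congr 1
        · clear hclamp hstepA hstepB
          omega
        · clear hclamp hstepA hstepB
          congr 1
          omega
      rw [hstepA, hwin, hstepB]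
      exact ih (s + 1) (lo + (c : Int)) hi (by omega) (by omega) h2

-- ===== VERDICT (by name: the statement is the Claim_ definition above) =====
theorem solution_spec : Claim_equal_solution := by
  intro arr query _
  unfold Spec_solution solution solution_alt
  obtain ⟨h0, h1, h2, h3⟩ :=
    sol_loop arr query 0 0 (arr.length : Int) (by omega) (by omega) (by omega)
  have hinit : solWindow arr 0 (arr.length : Int) = arr := by
    simp [solWindow]
  rw [hinit] at h3
  rw [h3]
  set st := (PySem.List.enumerate query 0).foldl solStepB (0, (arr.length : Int)) with hst
  rw [PySem.List.slice_of_nonneg arr h0 (le_trans h0 h1) (le_trans h1 h2) h2]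
  unfold solWindow
  congr 1
  omega
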